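-- pv_equiv track=rewrite | github.com/JacksonLind/CTF_Hunter | CTF-Tools-main/ctf_hunter/analyzers/crypto_rsa.py | _wiener_attack
-- ===== SOURCE A (Python) =====
-- from typing import List, Optional, Tuple
--
-- def _continued_fraction(n: int, d: int) -> List[int]:
--     """Return the continued fraction expansion of n/d."""
--     cf = []
--     while d:
--         q, r = divmod(n, d)
--         cf.append(q)
--         n, d = d, r
--     return cf
--
-- def _convergents(cf: List[int]) -> List[Tuple[int, int]]:
--     """Return the convergents of a continued fraction."""
--     convs = []
--     p_prev, p_curr = 1, cf[0]
--     q_prev, q_curr = 0, 1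
--     convs.append((p_curr, q_curr))
--     for i in range(1, len(cf)):
--         p_prev, p_curr = p_curr, cf[i] * p_curr + p_prev
--         q_prev, q_curr = q_curr, cf[i] * q_curr + q_prev
--         convs.append((p_curr, q_curr))
--     return convs
--
-- def _isqrt(n: int) -> int:
--     if n < 0:
--         raise ValueError("Square root not defined for negative numbers")
--     if n == 0:
--         return 0
--     x = n
--     y = (x + 1) // 2
--     while y < x:
--         x = y
--         y = (x + n // x) // 2
--     return x
--
-- def _wiener_attack(n: int, e: int) -> Optional[int]:
--     """
--     Wiener's attack on RSA.  Returns private exponent d if the attack succeeds,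
--     otherwise None.
--     """
--     cf = _continued_fraction(e, n)
--     for k, d in _convergents(cf):
--         if k == 0:
--             continue
--         phi_candidate, rem = divmod(e * d - 1, k)
--         if rem != 0:
--             continue
--         # Check if phi_candidate gives integer p, q
--         # n = p*q, p+q = n - phi + 1, p*q = n
--         b = n - phi_candidate + 1
--         discriminant = b * b - 4 * n
--         if discriminant < 0:
--             continue
--         sqrt_disc = _isqrt(discriminant)
--         if sqrt_disc * sqrt_disc == discriminant:
--             return d
--     return None
-- ===== SOURCE B (Python) =====
-- from typing import Optional
--
-- def _isqrt_floor(m: int) -> int: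
--     """Floor square root by binary search on [0, m+1)."""
--     lo, hi = 0, m + 1
--     while hi - lo > 1:
--         mid = (lo + hi) // 2
--         if mid * mid <= m:
--             lo = mid
--         else:
--             hi = mid
--     return lo
--
-- def _wiener_attack(n: int, e: int) -> Optional[int]:
--     """Streaming Wiener attack: run the Euclidean expansion of e/n while
--     advancing the convergent recurrence, testing each (k, d) immediately."""
--     num, den = e, n
--     p_prev, p_pprev = 1, 0
--     q_prev, q_pprev = 0, 1
--     while den:
--         a, r = divmod(num, den)
--         p_prev, p_pprev = a * p_prev + p_pprev, p_prev
--         q_prev, q_pprev = a * q_prev + q_pprev, q_prev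
--         k, d = p_prev, q_prev
--         if k != 0 and (e * d - 1) % k == 0:
--             phi = (e * d - 1) // k
--             b = n - phi + 1
--             disc = b * b - 4 * n
--             if disc >= 0:
--                 s = _isqrt_floor(disc)
--                 if s * s == disc:
--                     return d
--         num, den = den, r
--     return None
-- ===== Notes on version B (the rewrite author's own statement) =====
-- stated objective: alternative
-- what changed: A builds the full continued-fraction list, then a full convergents list, then scans it with a Newton integer sqrt; B is a single streaming Euclid loop that advances the convergent recurrence and tests each (k,d) candidate immediately, verifying the discriminant with a binary-search floor sqrt, so no intermediate lists are built.
-- outside the precondition, e.g. on _wiener_attack(0, 7): A raises IndexError, B returns None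
import Mathlib
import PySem

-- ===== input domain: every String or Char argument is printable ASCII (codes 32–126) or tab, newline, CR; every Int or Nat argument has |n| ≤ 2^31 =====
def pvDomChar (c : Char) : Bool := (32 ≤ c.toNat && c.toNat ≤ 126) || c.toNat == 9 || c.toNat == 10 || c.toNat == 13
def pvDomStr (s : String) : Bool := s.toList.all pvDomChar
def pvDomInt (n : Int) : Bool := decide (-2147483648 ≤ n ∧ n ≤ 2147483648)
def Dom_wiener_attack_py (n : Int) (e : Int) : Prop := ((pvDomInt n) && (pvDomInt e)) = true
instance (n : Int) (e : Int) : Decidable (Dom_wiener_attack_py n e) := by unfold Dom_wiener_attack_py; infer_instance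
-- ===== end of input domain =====

-- B replaces A's three-stage pipeline (continued-fraction list, convergents list, scan) by one
-- streaming Euclid loop testing each convergent immediately, with a binary-search floor sqrt;
-- objective: alternative decomposition, same results (A raises IndexError at n = 0, excluded by Pre_).

-- ===== PORT A =====

-- Python's `r = n % d` shrinks |d| (cited by the termination proofs of both ports).
theorem pv_mod_natAbs_lt (n d : Int) (hd : d ≠ 0) :
    (PySem.Int.mod n d).natAbs < d.natAbs := by
  rcases lt_or_gt_of_ne hd with h | h
  · have := PySem.Int.mod_neg_bounds n h
    omega
  · have h1 := PySem.Int.mod_nonneg n h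
    have h2 := PySem.Int.mod_lt n h
    omega

-- _continued_fraction(n, d)
def contFracA (n : Int) (d : Int) : List Int :=
  if hd : d = 0 then []
  else PySem.Int.floordiv n d :: contFracA d (PySem.Int.mod n d)
termination_by d.natAbs
decreasing_by exact pv_mod_natAbs_lt n d hd

-- the body of _convergents' for-loop (state: p_prev, p_curr, q_prev, q_curr, convs)
def convStepA (st : Int × Int × Int × Int × List (Int × Int)) (a : Int) :
    Int × Int × Int × Int × List (Int × Int) :=
  let (pp, pc, qp, qc, acc) := st
  (pc, a * pc + pp, qc, a * qc + qp, acc ++ [(a * pc + pp, a * qc + qp)])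

-- _convergents(cf) for cf = c0 :: rest (cf[0] raises IndexError on [], excluded by Pre_)
def convergentsA (c0 : Int) (rest : List Int) : List (Int × Int) :=
  (rest.foldl convStepA (1, c0, 0, 1, [(c0, 1)])).2.2.2.2

-- the while-loop of _isqrt; the extra `0 ≤ y` in the guard only makes the recursion
-- well-founded: every call made by pyIsqrt (n ≥ 1) keeps 1 ≤ y, so it never differs from Python
def pyIsqrtGo (n : Int) (x : Int) (y : Int) : Int :=
  if h : 0 ≤ y ∧ y < x then
    pyIsqrtGo n y (PySem.Int.floordiv (y + PySem.Int.floordiv n y) 2)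
  else x
termination_by x.toNat
decreasing_by omega

-- _isqrt(n); the n < 0 branch is Python's ValueError, unreachable (callers check disc ≥ 0)
def pyIsqrt (n : Int) : Int :=
  if n < 0 then 0
  else if n = 0 then 0
  else pyIsqrtGo n n (PySem.Int.floordiv (n + 1) 2)

-- the for-loop of _wiener_attack over the convergents
def scanA (n : Int) (e : Int) : List (Int × Int) → Option Int
  | [] => none
  | (k, d) :: rest =>
    if k = 0 then scanA n e rest
    else
      let phi := PySem.Int.floordiv (e * d - 1) k
      let rem := PySem.Int.mod (e * d - 1) k
      if rem ≠ 0 then scanA n e rest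
      else
        let b := n - phi + 1
        let disc := b * b - 4 * n
        if disc < 0 then scanA n e rest
        else if pyIsqrt disc * pyIsqrt disc = disc then some d
        else scanA n e rest

def wiener_attack_py (n : Int) (e : Int) : Option Int :=
  match contFracA e n with
  | [] => none  -- Python raises IndexError (cf[0]) here; excluded by Pre_ (n ≠ 0)
  | c0 :: rest => scanA n e (convergentsA c0 rest)

-- ===== PORT B =====

-- midpoint of _isqrt_floor's binary search is strictly inside (cited by bsLoop's termination)
theorem pv_bs_mid_bounds (lo hi : Int) (h : 1 < hi - lo) :
    lo < PySem.Int.floordiv (lo + hi) 2 ∧ PySem.Int.floordiv (lo + hi) 2 < hi := by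
  constructor
  · have := (PySem.Int.le_floordiv_iff_mul_le (a := lo + hi) (b := 2) (q := lo + 1) (by omega)).mpr
    omega
  · have := (PySem.Int.floordiv_lt_iff_lt_mul (a := lo + hi) (b := 2) (q := hi) (by omega)).mpr
    omega

-- the while-loop of _isqrt_floor
def bsLoop (m : Int) (lo : Int) (hi : Int) : Int :=
  if h : 1 < hi - lo then
    let mid := PySem.Int.floordiv (lo + hi) 2
    if mid * mid ≤ m then bsLoop m mid hi else bsLoop m lo mid
  else lo
termination_by (hi - lo).toNat
decreasing_by
  · have := pv_bs_mid_bounds lo hi h; omega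
  · have := pv_bs_mid_bounds lo hi h; omega

-- _isqrt_floor(m)
def isqrtB (m : Int) : Int := bsLoop m 0 (m + 1)

-- the while-loop of B's _wiener_attack (state: num, den, p_prev, p_pprev, q_prev, q_pprev)
def bLoop (n : Int) (e : Int) (num : Int) (den : Int)
    (pp : Int) (ppp : Int) (qp : Int) (qpp : Int) : Option Int :=
  if hden : den = 0 then none
  else
    let a := PySem.Int.floordiv num den
    let r := PySem.Int.mod num den
    let k := a * pp + ppp
    let d := a * qp + qpp
    if k ≠ 0 ∧ PySem.Int.mod (e * d - 1) k = 0 then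
      let phi := PySem.Int.floordiv (e * d - 1) k
      let b := n - phi + 1
      let disc := b * b - 4 * n
      if 0 ≤ disc ∧ isqrtB disc * isqrtB disc = disc then some d
      else bLoop n e den r k pp d qp
    else bLoop n e den r k pp d qp
termination_by den.natAbs
decreasing_by
  · exact pv_mod_natAbs_lt num den hden
  · exact pv_mod_natAbs_lt num den hden

def wiener_attack_py_alt (n : Int) (e : Int) : Option Int :=
  bLoop n e e n 1 0 0 1

-- ===== PRECONDITION & SPEC =====
-- Pre_ excludes only n = 0, where A raises IndexError (empty continued fraction, cf[0]).
def Pre_wiener_attack_py (n : Int) (e : Int) : Prop := n ≠ 0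
instance (n : Int) (e : Int) : Decidable (Pre_wiener_attack_py n e) := by
  unfold Pre_wiener_attack_py; infer_instance

def pvWitness_wiener_attack_py : Int × Int := (55, 17)

def Spec_wiener_attack_py (n : Int) (e : Int) (out : Option Int) : Prop :=
  out = wiener_attack_py_alt n e
instance (n : Int) (e : Int) (out : Option Int) : Decidable (Spec_wiener_attack_py n e out) := by
  unfold Spec_wiener_attack_py; infer_instance

-- ===== CLAIM (what is proved, stated in full; the proofs are below) =====
def Claim_equal_wiener_attack_py : Prop := ∀ (n : Int) (e : Int), Dom_wiener_attack_py n e → Pre_wiener_attack_py n e → Spec_wiener_attack_py n e (wiener_attack_py n e)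

-- ===== LEMMAS AND PROOFS =====

-- § 1: both integer square roots compute ⌊√m⌋ for m ≥ 0.

theorem pyIsqrtGo_eq_iter : ∀ (N : Nat) (n x : Int), 1 ≤ n → 1 ≤ x → x.toNat ≤ N →
    pyIsqrtGo n x (PySem.Int.floordiv (x + PySem.Int.floordiv n x) 2)
      = ((Nat.sqrt.iter n.toNat x.toNat : Nat) : Int) := by
  intro N
  induction N with
  | zero => intro n x _ hx hb; omega
  | succ N ih =>
    intro n x hn hx hb
    obtain ⟨X, rfl⟩ : ∃ X : Nat, x = (X : Int) := ⟨x.toNat, by omega⟩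
    obtain ⟨Nn, rfl⟩ : ∃ m : Nat, n = (m : Int) := ⟨n.toNat, by omega⟩
    have hX1 : 1 ≤ X := by omega
    have hN1 : 1 ≤ Nn := by omega
    have hy : PySem.Int.floordiv ((X : Int) + PySem.Int.floordiv (Nn : Int) (X : Int)) 2
        = (((X + Nn / X) / 2 : Nat) : Int) := by
      rw [PySem.Int.floordiv_natCast]
      rw [(by push_cast; ring : ((X : Int) + ((Nn / X : Nat) : Int)) = (((X + Nn / X : Nat) : Nat) : Int))]
      exact_mod_cast PySem.Int.floordiv_natCast (X + Nn / X) 2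
    rw [hy, pyIsqrtGo, Nat.sqrt.iter]
    simp only [Int.toNat_natCast]
    have hY1 : 1 ≤ (X + Nn / X) / 2 := by
      rcases Nat.lt_or_ge X 2 with h2 | h2
      · have : X = 1 := by omega
        subst this
        simp only [Nat.div_one]
        omega
      · have h3 : 2 ≤ X + Nn / X := Nat.le_add_right_of_le h2
        omega
    have hb' : X ≤ N + 1 := by omega
    by_cases hlt : (X + Nn / X) / 2 < X
    · rw [dif_pos (by constructor <;> [positivity; exact_mod_cast hlt]), dif_pos hlt]
      have := ih (Nn : Int) (((X + Nn / X) / 2 : Nat) : Int) hn (by exact_mod_cast hY1)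
        (by omega)
      simpa using this
    · rw [dif_neg (by push_cast; omega), dif_neg hlt]

theorem pyIsqrt_bracket (m : Int) (hm : 0 ≤ m) :
    0 ≤ pyIsqrt m ∧ pyIsqrt m * pyIsqrt m ≤ m ∧ m < (pyIsqrt m + 1) * (pyIsqrt m + 1) := by
  rcases eq_or_lt_of_le hm with h0 | h0
  · simp [pyIsqrt, ← h0]
  · have hdd : PySem.Int.floordiv m m = 1 := by
      rw [PySem.Int.floordiv_eq_iff_of_pos h0]; omega
    have h1 : pyIsqrt m = ((Nat.sqrt.iter m.toNat m.toNat : Nat) : Int) := by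
      unfold pyIsqrt
      rw [if_neg (by omega), if_neg (by omega),
        (by rw [hdd] : (m + 1) = m + PySem.Int.floordiv m m)]
      exact pyIsqrtGo_eq_iter m.toNat m m (by omega) (by omega) le_rfl
    have hle := Nat.sqrt.iter_sq_le m.toNat m.toNat
    have hlt := Nat.sqrt.lt_iter_succ_sq m.toNat m.toNat (by nlinarith [m.toNat.le_refl])
    refine ⟨by rw [h1]; positivity, ?_, ?_⟩
    · rw [h1]; exact_mod_cast (by exact_mod_cast hle : ((Nat.sqrt.iter m.toNat m.toNat * Nat.sqrt.iter m.toNat m.toNat : Nat) : Int) ≤ ((m.toNat : Nat) : Int)).trans_eq (by omega)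
    · rw [h1]
      have : ((m.toNat : Nat) : Int) < (((Nat.sqrt.iter m.toNat m.toNat + 1) * (Nat.sqrt.iter m.toNat m.toNat + 1) : Nat) : Int) := by exact_mod_cast hlt
      push_cast at this ⊢
      omega

theorem bsLoop_eq : ∀ (K : Nat) (m lo hi r : Int), (hi - lo).toNat ≤ K →
    0 ≤ lo → lo ≤ r → r < hi → r * r ≤ m → m < (r + 1) * (r + 1) →
    bsLoop m lo hi = r := by
  intro K
  induction K with
  | zero => intro m lo hi r h1 h2 h3 h4 _ _; rw [bsLoop]; simp only [dif_neg (by omega : ¬ 1 < hi - lo)]; omega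
  | succ K ih =>
    intro m lo hi r h1 h2 h3 h4 h5 h6
    rw [bsLoop]
    by_cases hg : 1 < hi - lo
    · have hmid := pv_bs_mid_bounds lo hi hg
      simp only [dif_pos hg]
      by_cases hle : PySem.Int.floordiv (lo + hi) 2 * PySem.Int.floordiv (lo + hi) 2 ≤ m
      · simp only [if_pos hle]
        have hmr : PySem.Int.floordiv (lo + hi) 2 ≤ r := by nlinarith [hmid.1, hmid.2]
        exact ih m _ hi r (by omega) (by omega) hmr h4 h5 h6
      · simp only [if_neg hle]
        have hrm : r < PySem.Int.floordiv (lo + hi) 2 := by nlinarith [hmid.1, hmid.2]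
        exact ih m lo _ r (by omega) h2 h3 hrm h5 h6
    · simp only [dif_neg hg]; omega

theorem isqrt_agree (m : Int) (hm : 0 ≤ m) : isqrtB m = pyIsqrt m := by
  obtain ⟨hr0, hr1, hr2⟩ := pyIsqrt_bracket m hm
  have hrm : pyIsqrt m ≤ m := by nlinarith
  exact bsLoop_eq (m + 1).toNat m 0 (m + 1) (pyIsqrt m) (by omega) le_rfl hr0 (by omega) hr1 hr2

-- § 2: B's fused loop is A's scan over the convergent stream.

-- the convergent stream generated directly by the recurrence
def convRec : List Int → Int → Int → Int → Int → List (Int × Int)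
  | [], _, _, _, _ => []
  | a :: rest, pp, ppp, qp, qpp =>
      (a * pp + ppp, a * qp + qpp) :: convRec rest (a * pp + ppp) pp (a * qp + qpp) qp

theorem convStepA_foldl (rest : List Int) : ∀ (pp pc qp qc : Int) (acc : List (Int × Int)),
    (List.foldl convStepA (pp, pc, qp, qc, acc) rest).2.2.2.2 = acc ++ convRec rest pc pp qc qp := by
  induction rest with
  | nil => intro pp pc qp qc acc; simp [convRec]
  | cons a rest ih =>
    intro pp pc qp qc acc
    simp only [List.foldl_cons, convStepA, convRec, ih]
    simp

theorem convergentsA_eq_convRec (c0 : Int) (rest : List Int) :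
    convergentsA c0 rest = (c0, 1) :: convRec rest c0 1 1 0 := by
  unfold convergentsA
  rw [convStepA_foldl]
  simp

theorem bLoop_eq_scan (n e : Int) : ∀ (N : Nat) (den num pp ppp qp qpp : Int),
    den.natAbs ≤ N →
    bLoop n e num den pp ppp qp qpp
      = scanA n e (convRec (contFracA num den) pp ppp qp qpp) := by
  intro N
  induction N with
  | zero =>
    intro den num pp ppp qp qpp hb
    have hden : den = 0 := by omega
    subst hden
    rw [bLoop, contFracA]
    simp [convRec, scanA]
  | succ N ih =>
    intro den num pp ppp qp qpp hb
    by_cases hden : den = 0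
    · subst hden
      rw [bLoop, contFracA]
      simp [convRec, scanA]
    · have hr := pv_mod_natAbs_lt num den hden
      have hrec := ih (PySem.Int.mod num den) den
        (PySem.Int.floordiv num den * pp + ppp) pp
        (PySem.Int.floordiv num den * qp + qpp) qp (by omega)
      rw [bLoop, contFracA]
      simp only [dif_neg hden, convRec, scanA]
      set a := PySem.Int.floordiv num den with ha
      set k := a * pp + ppp with hk'
      set d := a * qp + qpp with hd'
      set phi := PySem.Int.floordiv (e * d - 1) k with hphi
      set disc := (n - phi + 1) * (n - phi + 1) - 4 * n with hdisc
      by_cases hk : k = 0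
      · simp only [hk] at hrec
        simp [hk, hrec]
      · by_cases hm : PySem.Int.mod (e * d - 1) k = 0
        · by_cases hd0 : (0:Int) ≤ disc
          · rw [isqrt_agree disc hd0]
            by_cases hs : pyIsqrt disc * pyIsqrt disc = disc
            · simp [hk, hm, hd0, hs]
            · simp [hk, hm, hd0, hs, hrec, not_lt.mpr hd0]
          · simp [hk, hm, hrec, not_le.mp hd0]
        · simp [hk, hm, hrec]

-- ===== VERDICT (by name: the statement is the Claim_ definition above) =====
theorem wiener_attack_py_spec : Claim_equal_wiener_attack_py := by
  intro n e _ hpre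
  have hn : n ≠ 0 := hpre
  show wiener_attack_py n e = wiener_attack_py_alt n e
  unfold wiener_attack_py wiener_attack_py_alt
  rw [bLoop_eq_scan n e n.natAbs n e 1 0 0 1 le_rfl, contFracA]
  simp only [dif_neg hn]
  rw [convergentsA_eq_convRec]
  simp [convRec]
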